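-- pv_equiv track=rewrite | github.com/J3m3/Algorithm-BOJ | Python/23304_아카라카.py | is_akaraka
-- ===== SOURCE A (Python) =====
-- def is_palindrome(seq, l, r):
--     if l >= r:
--         return True
--
--     if seq[l] != seq[r]:
--         return False
--
--     return is_palindrome(seq, l+1, r-1)
--
-- def is_akaraka(seq, l, r):
--     if l >= r:
--         return True
--
--     if not is_palindrome(seq, l, r):
--         return False
--
--     mid = (l + r) // 2
--     if (l + r) & 1:
--         return is_akaraka(seq, l, mid)
--     else:
--         return is_akaraka(seq, l, mid-1)
-- ===== SOURCE B (Python) =====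
-- def is_akaraka(seq, l, r):
--     while l < r:
--         s = seq[l:r+1]
--         if s != s[::-1]:
--             return False
--         mid = (l + r) // 2
--         r = mid if (l + r) & 1 else mid - 1
--     return True
-- ===== Notes on version B (the rewrite author's own statement) =====
-- stated objective: simpler
-- what changed: Replaces both recursions with one iterative while loop that tests each level's palindrome property by a slice/reverse comparison (seq[l:r+1] == its reverse) instead of the two-pointer index recursion.
-- outside the precondition, e.g. on is_akaraka('ab', -1, 0): A returns False, B returns True
import Mathlib
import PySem

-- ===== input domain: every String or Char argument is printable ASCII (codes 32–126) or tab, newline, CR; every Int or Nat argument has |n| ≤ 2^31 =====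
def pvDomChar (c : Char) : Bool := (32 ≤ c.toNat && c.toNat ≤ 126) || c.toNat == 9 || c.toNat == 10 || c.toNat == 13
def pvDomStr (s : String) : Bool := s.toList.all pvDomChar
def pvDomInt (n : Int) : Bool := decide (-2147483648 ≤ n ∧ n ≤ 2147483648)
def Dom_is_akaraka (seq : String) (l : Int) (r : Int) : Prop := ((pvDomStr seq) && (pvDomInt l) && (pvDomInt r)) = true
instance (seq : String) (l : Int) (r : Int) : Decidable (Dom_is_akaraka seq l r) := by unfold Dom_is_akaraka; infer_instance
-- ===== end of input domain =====

-- B replaces the two recursions of A by one iterative loop whose per-level palindrome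
-- test is a slice/reverse comparison (seq[l:r+1] == its reverse); simpler, no speed claim.

-- ===== PORT A =====
-- is_palindrome(seq, l, r); indexing via pyGet? (none = IndexError, excluded by Pre_)
def pvIsPal (cs : List Char) (l : Int) (r : Int) : Bool :=
  if _h : l ≥ r then true
  else
    match PySem.List.pyGet? cs l, PySem.List.pyGet? cs r with
    | some a, some b => if a ≠ b then false else pvIsPal cs (l + 1) (r - 1)
    | _, _ => false    -- Python raises IndexError here; Pre_ excludes these inputs
termination_by (r - l).toNat
decreasing_by omega

def is_akaraka (seq : String) (l : Int) (r : Int) : Bool :=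
  if _h : l ≥ r then true
  else if ¬ pvIsPal seq.toList l r then false
  else
    let mid := PySem.Int.floordiv (l + r) 2
    if PySem.Int.band (l + r) 1 ≠ 0 then is_akaraka seq l mid
    else is_akaraka seq l (mid - 1)
termination_by (r - l).toNat
decreasing_by
  all_goals
    have hm : PySem.Int.floordiv (l + r) 2 < r :=
      (PySem.Int.floordiv_lt_iff_lt_mul (by omega)).mpr (by omega)
    omega

-- ===== PORT B =====
-- the while loop of Source B as recursion on (l, r); s[::-1] is slice? with step -1
def pvAkaAltGo (cs : List Char) (l : Int) (r : Int) : Bool :=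
  if _h : l < r then
    let s := PySem.List.slice cs (some l) (some (r + 1))
    if (some s : Option (List Char)) ≠ PySem.List.slice? s none none (-1) then false
    else
      let mid := PySem.Int.floordiv (l + r) 2
      pvAkaAltGo cs l (if PySem.Int.band (l + r) 1 ≠ 0 then mid else mid - 1)
  else true
termination_by (r - l).toNat
decreasing_by
  have hm : PySem.Int.floordiv (l + r) 2 < r :=
    (PySem.Int.floordiv_lt_iff_lt_mul (by omega)).mpr (by omega)
  split <;> omega

def is_akaraka_alt (seq : String) (l : Int) (r : Int) : Bool :=
  pvAkaAltGo seq.toList l r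

-- ===== PRECONDITION & SPEC =====
-- Pre_ excludes exactly the inputs with l < r whose endpoints are not ordinary in-range
-- indices: there A either raises IndexError or returns a value produced by Python's
-- accidental negative-index wraparound (e.g. ("ab", -1, 0)), which B does not reproduce.
def Pre_is_akaraka (seq : String) (l : Int) (r : Int) : Prop :=
  r ≤ l ∨ (0 ≤ l ∧ r < (seq.toList.length : Int))
instance (seq : String) (l : Int) (r : Int) : Decidable (Pre_is_akaraka seq l r) := by
  unfold Pre_is_akaraka; infer_instance

def pvWitness_is_akaraka : String × Int × Int := ("abacaba", 0, 6)

def Spec_is_akaraka (seq : String) (l : Int) (r : Int) (out : Bool) : Prop := out = is_akaraka_alt seq l r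
instance (seq : String) (l : Int) (r : Int) (out : Bool) : Decidable (Spec_is_akaraka seq l r out) := by unfold Spec_is_akaraka; infer_instance

-- ===== CLAIM (what is proved, stated in full; the proofs are below) =====
def Claim_equal_is_akaraka : Prop := ∀ (seq : String) (l : Int) (r : Int), Dom_is_akaraka seq l r → Pre_is_akaraka seq l r → Spec_is_akaraka seq l r (is_akaraka seq l r)

-- ===== LEMMAS AND PROOFS =====

-- lists of length ≤ 1 are their own reverse
lemma pv_rev_short (u : List Char) (h : u.length ≤ 1) : u.reverse = u := by
  match u with
  | [] => rfl
  | [a] => rfl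
  | a :: b :: t => simp at h

-- a slice with a < b, b < length splits as head :: middle ++ [last]
lemma pv_decomp (cs : List Char) (a b : Nat) (hab : a < b) (hb : b < cs.length) :
    (cs.drop a).take (b + 1 - a) = cs[a] :: (((cs.drop (a + 1)).take (b - (a + 1))) ++ [cs[b]]) := by
  have ha : a < cs.length := lt_trans hab hb
  have h2 : (List.drop (a + 1) cs)[b - (a + 1)]? = some cs[b] := by
    rw [List.getElem?_drop]
    have h3 : a + 1 + (b - (a + 1)) = b := by omega
    rw [h3, List.getElem?_eq_getElem hb]
  have h1 : b + 1 - a = (b - (a + 1) + 1) + 1 := by omega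
  rw [List.drop_eq_getElem_cons ha, h1, List.take_succ_cons, List.take_add_one, h2]
  simp

-- a :: u ++ [b] is a palindrome iff a = b and u is
lemma pv_pal_step (a b : Char) (u : List Char) :
    (a :: (u ++ [b]) = (a :: (u ++ [b])).reverse) ↔ (a = b ∧ u = u.reverse) := by
  simp only [List.reverse_cons, List.reverse_append, List.reverse_cons, List.reverse_nil,
    List.nil_append, List.cons_append, List.cons.injEq]
  constructor
  · rintro ⟨h1, h2⟩
    refine ⟨h1, ?_⟩
    subst h1
    exact (List.append_inj' h2 (by simp)).1
  · rintro ⟨rfl, h⟩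
    exact ⟨rfl, by rw [← h]⟩

-- the two-pointer recursion of A computes "slice l..r+1 equals its reverse"
lemma pv_palEq (cs : List Char) : ∀ (k : Nat) (l r : Int), (r - l).toNat = k →
    0 ≤ l → l ≤ r + 1 → r < (cs.length : Int) →
    pvIsPal cs l r =
      decide (PySem.List.slice cs (some l) (some (r + 1)) =
              (PySem.List.slice cs (some l) (some (r + 1))).reverse) := by
  intro k
  induction k using Nat.strong_induction_on with
  | _ k ih =>
    intro l r hk hl hlr hr
    have hb1 : (0 : Int) ≤ r + 1 := by omega
    rw [PySem.List.slice_toNat cs hl hb1]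
    by_cases hge : l ≥ r
    · rw [pvIsPal]
      simp only [dif_pos hge]
      have hshort : ((cs.drop l.toNat).take ((r + 1).toNat - l.toNat)).length ≤ 1 := by
        have := List.length_take_le ((r + 1).toNat - l.toNat) (cs.drop l.toNat)
        omega
      rw [pv_rev_short _ hshort]
      simp
    · have hlr' : l < r := by omega
      have hrl : (0 : Int) ≤ r := by omega
      have hln : l < (cs.length : Int) := by omega
      have hEq : (r + 1).toNat - l.toNat = r.toNat + 1 - l.toNat := by omega
      have hdec := pv_decomp cs l.toNat r.toNat (by omega) (by omega)
      have hiff : ((cs.drop l.toNat).take ((r + 1).toNat - l.toNat) =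
            ((cs.drop l.toNat).take ((r + 1).toNat - l.toNat)).reverse) ↔
          (cs[l.toNat] = cs[r.toNat] ∧
            ((cs.drop (l.toNat + 1)).take (r.toNat - (l.toNat + 1)) =
             ((cs.drop (l.toNat + 1)).take (r.toNat - (l.toNat + 1))).reverse)) := by
        rw [hEq, hdec]
        exact pv_pal_step _ _ _
      simp only [hiff]
      rw [pvIsPal]
      simp only [dif_neg hge]
      rw [PySem.List.pyGet?_eq_some_getElem cs hl hln,
          PySem.List.pyGet?_eq_some_getElem cs hrl hr]
      have e1 : (l + 1).toNat = l.toNat + 1 := by omega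
      have e2 : ((r - 1) + 1).toNat = r.toNat := by omega
      have hrec := ih ((r - 1) - (l + 1)).toNat (by omega) (l + 1) (r - 1) rfl
        (by omega) (by omega) (by omega)
      rw [PySem.List.slice_toNat cs (by omega) (by omega), e1, e2] at hrec
      by_cases hc : cs[l.toNat] = cs[r.toNat]
      · simp [hc, hrec]
      · simp [hc]

lemma pv_akEq (seq : String) : ∀ (k : Nat) (l r : Int), (r - l).toNat = k →
    (r ≤ l ∨ (0 ≤ l ∧ r < (seq.toList.length : Int))) →
    is_akaraka seq l r = pvAkaAltGo seq.toList l r := by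
  intro k
  induction k using Nat.strong_induction_on with
  | _ k ih =>
    intro l r hk hpre
    by_cases hge : l ≥ r
    · rw [is_akaraka, pvAkaAltGo]
      simp [hge]
    · obtain ⟨hl, hr⟩ : 0 ≤ l ∧ r < (seq.toList.length : Int) := by
        rcases hpre with h | h
        · omega
        · exact h
      have hlt : l < r := by omega
      rw [is_akaraka, pvAkaAltGo]
      simp only [dif_neg hge, dif_pos hlt]
      rw [PySem.List.slice?_none_none_neg_one]
      have hp := pv_palEq seq.toList ((r - l).toNat) l r rfl hl (by omega) hr
      have hm : PySem.Int.floordiv (l + r) 2 < r :=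
        (PySem.Int.floordiv_lt_iff_lt_mul (by omega)).mpr (by omega)
      have hml : l ≤ PySem.Int.floordiv (l + r) 2 :=
        (PySem.Int.floordiv_two_mid_bounds (by omega : l ≤ r)).1
      set mid := PySem.Int.floordiv (l + r) 2 with hmid
      set s := PySem.List.slice seq.toList (some l) (some (r + 1)) with hs
      by_cases hpal : s = s.reverse
      · have hA : pvIsPal seq.toList l r = true := by rw [hp]; exact decide_eq_true hpal
        rw [hA, if_neg (not_not_intro (congrArg some hpal)), if_neg (show ¬¬(true = true) by simp)]
        by_cases hb : PySem.Int.band (l + r) 1 = 0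
        · simp only [hb, ne_eq, not_true_eq_false, if_false]
          exact ih (mid - 1 - l).toNat (by omega) l (mid - 1) rfl
            (Or.inr ⟨hl, by omega⟩)
        · simp only [ne_eq, hb, not_false_eq_true, if_true]
          exact ih (mid - l).toNat (by omega) l mid rfl (Or.inr ⟨hl, by omega⟩)
      · have hA : pvIsPal seq.toList l r = false := by rw [hp]; exact decide_eq_false hpal
        simp [hA, hpal]

-- ===== VERDICT (by name: the statement is the Claim_ definition above) =====
theorem is_akaraka_spec : Claim_equal_is_akaraka := by
  unfold Claim_equal_is_akaraka
  intro seq l r _dom hpre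
  unfold Spec_is_akaraka is_akaraka_alt
  unfold Pre_is_akaraka at hpre
  exact pv_akEq seq ((r - l).toNat) l r rfl hpre
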